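-- pv_equiv track=rewrite | github.com/Somnath21-hub/gazeboard | eye_keyboard.py | get_key_at_position
-- ===== SOURCE A (Python) =====
-- keys = [
--     "1234567890",
--     "QWERTYUIOP",
--     "ASDFGHJKL",
--     "ZXCVBNM",
--     ".,?!",
--     ["SPACE", "BACK"]
-- ]
--
-- def get_key_at_position(x, y, key_width, key_height, keyboard_start_y):
--     row_y = keyboard_start_y
--     for row in keys:
--         col_x = 20
--         for key in (row if isinstance(row, list) else list(row)):
--             w = key_width
--             if key == "SPACE":
--                 w = key_width * 4
--             elif key == "BACK":
--                 w = key_width * 2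
--
--             if col_x < x < col_x+w and row_y < y < row_y+key_height:
--                 return key, (col_x, row_y, w, key_height)
--             col_x += w + 5
--         row_y += key_height + 5
--     return None, None
-- ===== SOURCE B (Python) =====
-- keys = [
--     "1234567890",
--     "QWERTYUIOP",
--     "ASDFGHJKL",
--     "ZXCVBNM",
--     ".,?!",
--     ["SPACE", "BACK"]
-- ]
--
-- def get_key_at_position(x, y, key_width, key_height, keyboard_start_y):
--     # row band is strict (row_y < y < row_y + key_height), so empty unless key_height >= 2
--     if key_height < 2:
--         return None, None
--     pitch = key_height + 5
--     row, off = divmod(y - keyboard_start_y, pitch)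
--     if not (0 <= row < len(keys) and 0 < off < key_height):
--         return None, None
--     row_y = keyboard_start_y + row * pitch
--     if row == 5:
--         if 20 < x < 20 + key_width * 4:
--             return "SPACE", (20, row_y, key_width * 4, key_height)
--         bx = 25 + key_width * 4
--         if bx < x < bx + key_width * 2:
--             return "BACK", (bx, row_y, key_width * 2, key_height)
--         return None, None
--     if key_width < 2:
--         return None, None
--     col, cx = divmod(x - 20, key_width + 5)
--     if 0 <= col < len(keys[row]) and 0 < cx < key_width:
--         return keys[row][col], (20 + col * (key_width + 5), row_y, key_width, key_height)
--     return None, None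
-- ===== Notes on version B (the rewrite author's own statement) =====
-- stated objective: alternative
-- what changed: B replaces A's scan over all six rows (and the per-key column scan with accumulated col_x) by direct arithmetic indexing: the row and the column are computed with one floor division/modulo by the uniform pitch (key_height+5 resp. key_width+5), keeping only an explicit two-interval check for the irregular SPACE/BACK row.
import Mathlib
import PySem

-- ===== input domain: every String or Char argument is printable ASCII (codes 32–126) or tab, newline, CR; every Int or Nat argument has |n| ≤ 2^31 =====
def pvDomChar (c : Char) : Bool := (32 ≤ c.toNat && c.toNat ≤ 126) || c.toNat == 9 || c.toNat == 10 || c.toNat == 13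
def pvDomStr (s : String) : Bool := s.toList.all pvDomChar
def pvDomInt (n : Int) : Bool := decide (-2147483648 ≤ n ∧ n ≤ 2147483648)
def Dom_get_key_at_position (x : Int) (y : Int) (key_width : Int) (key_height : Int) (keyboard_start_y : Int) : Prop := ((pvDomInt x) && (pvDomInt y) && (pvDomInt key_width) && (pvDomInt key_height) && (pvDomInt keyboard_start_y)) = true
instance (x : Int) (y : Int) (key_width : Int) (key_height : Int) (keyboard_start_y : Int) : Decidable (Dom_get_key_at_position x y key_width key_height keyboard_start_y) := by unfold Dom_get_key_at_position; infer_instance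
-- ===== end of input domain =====

-- B replaces A's scan over all rows and over all columns by direct arithmetic indexing
-- (floor division by the uniform row/column pitch); objective: alternative decomposition.

-- the module constant `keys` (each string row written as its list of 1-char keys, as A's list(row) produces)
def keysList : List (List String) :=
  [["1","2","3","4","5","6","7","8","9","0"],
   ["Q","W","E","R","T","Y","U","I","O","P"],
   ["A","S","D","F","G","H","J","K","L"],
   ["Z","X","C","V","B","N","M"],
   [".",",","?","!"],
   ["SPACE","BACK"]]

-- ===== PORT A =====
def widthOf (kw : Int) (k : String) : Int :=
  if k = "SPACE" then kw * 4 else if k = "BACK" then kw * 2 else kw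

def scanRowA (x y kw kh rowy : Int) : List String → Int → Option (String × Int × Int × Int × Int)
  | [], _ => none
  | k :: ks, colx =>
    let w := widthOf kw k
    if colx < x ∧ x < colx + w ∧ rowy < y ∧ y < rowy + kh then
      some (k, colx, rowy, w, kh)
    else
      scanRowA x y kw kh rowy ks (colx + w + 5)

def scanRowsA (x y kw kh : Int) : List (List String) → Int → Option (String × Int × Int × Int × Int)
  | [], _ => none
  | r :: rs, rowy =>
    match scanRowA x y kw kh rowy r 20 with
    | some v => some v
    | none => scanRowsA x y kw kh rs (rowy + kh + 5)

def get_key_at_position (x : Int) (y : Int) (key_width : Int) (key_height : Int) (keyboard_start_y : Int) : Option String × (Option (Int × Int × Int × Int)) :=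
  match scanRowsA x y key_width key_height keysList keyboard_start_y with
  | some (k, c) => (some k, some c)
  | none => (none, none)

-- ===== PORT B =====
def get_key_at_position_alt (x : Int) (y : Int) (key_width : Int) (key_height : Int) (keyboard_start_y : Int) : Option String × (Option (Int × Int × Int × Int)) :=
  if key_height < 2 then (none, none)
  else
    let pitch := key_height + 5
    let row := PySem.Int.floordiv (y - keyboard_start_y) pitch
    let off := PySem.Int.mod (y - keyboard_start_y) pitch
    if ¬ (0 ≤ row ∧ row < PySem.List.len keysList ∧ 0 < off ∧ off < key_height) then (none, none)
    else
      let row_y := keyboard_start_y + row * pitch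
      if row = 5 then
        if 20 < x ∧ x < 20 + key_width * 4 then
          (some "SPACE", some (20, row_y, key_width * 4, key_height))
        else
          let bx := 25 + key_width * 4
          if bx < x ∧ x < bx + key_width * 2 then
            (some "BACK", some (bx, row_y, key_width * 2, key_height))
          else (none, none)
      else if key_width < 2 then (none, none)
      else
        let rowKeys := PySem.List.pyGetD keysList row []
        let col := PySem.Int.floordiv (x - 20) (key_width + 5)
        let cx := PySem.Int.mod (x - 20) (key_width + 5)
        if 0 ≤ col ∧ col < PySem.List.len rowKeys ∧ 0 < cx ∧ cx < key_width then
          (some (PySem.List.pyGetD rowKeys col ""),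
           some (20 + col * (key_width + 5), row_y, key_width, key_height))
        else (none, none)

-- ===== PRECONDITION & SPEC =====
def Spec_get_key_at_position (x : Int) (y : Int) (key_width : Int) (key_height : Int) (keyboard_start_y : Int) (out : Option String × (Option (Int × Int × Int × Int))) : Prop := out = get_key_at_position_alt x y key_width key_height keyboard_start_y
instance (x : Int) (y : Int) (key_width : Int) (key_height : Int) (keyboard_start_y : Int) (out : Option String × (Option (Int × Int × Int × Int))) : Decidable (Spec_get_key_at_position x y key_width key_height keyboard_start_y out) := by unfold Spec_get_key_at_position; infer_instance

-- ===== CLAIM (what is proved, stated in full; the proofs are below) =====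
def Claim_equal_get_key_at_position : Prop := ∀ (x : Int) (y : Int) (key_width : Int) (key_height : Int) (keyboard_start_y : Int), Dom_get_key_at_position x y key_width key_height keyboard_start_y → Spec_get_key_at_position x y key_width key_height keyboard_start_y (get_key_at_position x y key_width key_height keyboard_start_y)

-- ===== LEMMAS AND PROOFS =====

-- a row whose vertical band misses y contributes nothing
lemma scanRowA_none_of_band (x y kw kh rowy : Int)
    (h : ¬ (rowy < y ∧ y < rowy + kh)) :
    ∀ (row : List String) (colx : Int), scanRowA x y kw kh rowy row colx = none := by
  intro row
  induction row with
  | nil => intro colx; rfl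
  | cons k ks ih =>
    intro colx
    rw [scanRowA]
    rw [if_neg (by tauto)]
    exact ih _

-- closed form for a row of plain keys (width kw, 2 ≤ kw), when the band holds
lemma scanRowA_plain (x y kw kh rowy : Int) (hkw : 2 ≤ kw)
    (hband : rowy < y ∧ y < rowy + kh) :
    ∀ (row : List String) (colx : Int),
      (∀ k ∈ row, widthOf kw k = kw) →
      scanRowA x y kw kh rowy row colx =
        (if 0 ≤ (x - colx) / (kw + 5) ∧ (x - colx) / (kw + 5) < (row.length : Int) ∧
            0 < (x - colx) % (kw + 5) ∧ (x - colx) % (kw + 5) < kw then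
          some (PySem.List.pyGetD row ((x - colx) / (kw + 5)) "",
                colx + ((x - colx) / (kw + 5)) * (kw + 5), rowy, kw, kh)
        else none) := by
  intro row
  induction row with
  | nil =>
    intro colx _
    simp [scanRowA]
    omega
  | cons k ks ih =>
    intro colx hw
    have hwk : widthOf kw k = kw := hw k (List.mem_cons_self ..)
    have hp : (0:Int) < kw + 5 := by omega
    rw [scanRowA]
    simp only [hwk]
    by_cases hc : colx < x ∧ x < colx + kw
    · -- hit the head key: x - colx ∈ (0, kw) ⊆ [0, kw+5)
      have hd : (x - colx) / (kw + 5) = 0 := by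
        apply Int.ediv_eq_zero_of_lt <;> omega
      have hm : (x - colx) % (kw + 5) = x - colx := by
        apply Int.emod_eq_of_lt <;> omega
      rw [if_pos (by tauto)]
      rw [hd, hm, if_pos (by simp; omega)]
      simp [PySem.List.pyGetD_zero_cons]
    · rw [if_neg (by tauto)]
      rw [ih (colx + kw + 5) (fun k hk => hw k (List.mem_cons_of_mem _ hk))]
      have hshift : x - (colx + kw + 5) = (x - colx) + (-1) * (kw + 5) := by ring
      have hdiv : (x - (colx + kw + 5)) / (kw + 5) = (x - colx) / (kw + 5) - 1 := by
        rw [hshift, Int.add_mul_ediv_right _ _ (by omega : kw + 5 ≠ 0)]; ring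
      have hmod : (x - (colx + kw + 5)) % (kw + 5) = (x - colx) % (kw + 5) := by
        rw [hshift, Int.add_mul_emod_self_right]
      set c := (x - colx) / (kw + 5) with hcdef
      set d := (x - colx) % (kw + 5) with hddef
      have hdc : x - colx = (kw + 5) * c + d := (Int.mul_ediv_add_emod _ _).symm -- decomposition x - colx = (kw+5)*c + d
      have hd0 : 0 ≤ d := Int.emod_nonneg _ (by omega)
      have hdlt : d < kw + 5 := Int.emod_lt_of_pos _ hp
      rw [hdiv, hmod]
      by_cases hc1 : 1 ≤ c
      · -- index shifts down by one into the tail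
        have hcond : (0 ≤ c - 1 ∧ c - 1 < (ks.length : Int) ∧ 0 < d ∧ d < kw) ↔
            (0 ≤ c ∧ c < ((k :: ks).length : Int) ∧ 0 < d ∧ d < kw) := by
          simp; omega
        by_cases hh : 0 ≤ c ∧ c < ((k :: ks).length : Int) ∧ 0 < d ∧ d < kw
        · rw [if_pos (hcond.mpr hh), if_pos hh]
          have hlen : c < (ks.length : Int) + 1 := by
            have := hh.2.1; simpa using this
          have hget : PySem.List.pyGetD ks (c - 1) "" = PySem.List.pyGetD (k :: ks) c "" := by
            rw [PySem.List.pyGetD_eq_getElem ks "" (by omega) (by omega),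
                PySem.List.pyGetD_eq_getElem (k :: ks) "" (by omega) (by simpa using hlen)]
            have hnat : c.toNat = (c - 1).toNat + 1 := by omega
            simp only [hnat, List.getElem_cons_succ]
          have harith : colx + kw + 5 + (c - 1) * (kw + 5) = colx + c * (kw + 5) := by ring
          rw [hget, harith]
        · rw [if_neg (fun hx => hh (hcond.mp hx)), if_neg hh]
      · -- c ≤ 0: neither side selects anything (head was a miss)
        have hcnot : ¬ (0 ≤ c ∧ c < ((k :: ks).length : Int) ∧ 0 < d ∧ d < kw) := by
          rintro ⟨h0, _, hd1, hd2⟩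
          have hc0 : c = 0 := by omega
          rw [hc0] at hdc
          apply hc
          constructor <;> omega
        rw [if_neg (by omega : ¬ (0 ≤ c - 1 ∧ c - 1 < (ks.length : Int) ∧ 0 < d ∧ d < kw))]
        rw [if_neg hcnot]

-- a row of plain keys never matches when kw ≤ 1 (the strict x band is empty)
lemma scanRowA_plain_none (x y kw kh rowy : Int) (hkw : kw ≤ 1) :
    ∀ (row : List String) (colx : Int),
      (∀ k ∈ row, widthOf kw k = kw) → scanRowA x y kw kh rowy row colx = none := by
  intro row
  induction row with
  | nil => intro colx _; rfl
  | cons k ks ih =>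
    intro colx hw
    have hwk : widthOf kw k = kw := hw k (List.mem_cons_self ..)
    rw [scanRowA]
    simp only [hwk]
    rw [if_neg (by omega : ¬ (colx < x ∧ x < colx + kw ∧ rowy < y ∧ y < rowy + kh))]
    exact ih _ (fun k hk => hw k (List.mem_cons_of_mem _ hk))

-- uniqueness of the floor-division row index from the band inequalities
lemma band_forces_q {pitch q r i : Int} (hp : 0 < pitch) (hr0 : 0 ≤ r) (hrp : r < pitch)
    (h1 : i * pitch < pitch * q + r) (h2 : pitch * q + r < i * pitch + pitch) : q = i := by
  rcases lt_trichotomy q i with h | h | h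
  · exfalso
    have hq : q + 1 ≤ i := h
    nlinarith
  · exact h
  · exfalso
    have hq : i + 1 ≤ q := h
    nlinarith

-- main equivalence, stated as a lemma and re-used by the verdict theorem
lemma main_equiv (x y kw kh ks : Int) :
    get_key_at_position x y kw kh ks = get_key_at_position_alt x y kw kh ks := by
  by_cases hkh : kh < 2
  · have hrows : ∀ (rows : List (List String)) (rowy : Int), scanRowsA x y kw kh rows rowy = none := by
      intro rows
      induction rows with
      | nil => intro rowy; rfl
      | cons rr rs ih =>
        intro rowy
        rw [scanRowsA, scanRowA_none_of_band x y kw kh rowy (by omega) rr 20]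
        exact ih _
    simp only [get_key_at_position, get_key_at_position_alt, hrows, if_pos hkh]
  · have hp : (0:Int) < kh + 5 := by omega
    have hfd : PySem.Int.floordiv (y - ks) (kh + 5) = (y - ks) / (kh + 5) :=
      PySem.Int.floordiv_eq_ediv_of_pos hp
    have hmd : PySem.Int.mod (y - ks) (kh + 5) = (y - ks) % (kh + 5) :=
      PySem.Int.mod_eq_emod_of_pos hp
    obtain ⟨q, hq⟩ : ∃ q, (y - ks) / (kh + 5) = q := ⟨_, rfl⟩
    obtain ⟨r, hr⟩ : ∃ r, (y - ks) % (kh + 5) = r := ⟨_, rfl⟩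
    have hdc : y - ks = (kh + 5) * q + r := by
      rw [← hq, ← hr]; exact (Int.mul_ediv_add_emod _ _).symm
    have hr0 : 0 ≤ r := hr ▸ Int.emod_nonneg _ (by omega)
    have hrlt : r < kh + 5 := hr ▸ Int.emod_lt_of_pos _ hp
    simp only [get_key_at_position, get_key_at_position_alt, hfd, hmd, hq, hr, if_neg hkh,
      PySem.List.len_eq, keysList, List.length_cons, List.length_nil, Nat.reduceAdd, Nat.cast_ofNat]
    by_cases hqr : 0 ≤ q ∧ q < 6 ∧ 0 < r ∧ r < kh
    · -- exactly one row band holds; index it directly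
      rw [if_neg (not_not_intro hqr)]
      obtain ⟨hq0, hq6, hr1, hr2⟩ := hqr
      interval_cases q
      · -- row 0 is the vertical hit
        have e1 := scanRowA_none_of_band x y kw kh (ks + kh + 5) (by omega)
        have e2 := scanRowA_none_of_band x y kw kh (ks + kh + 5 + kh + 5) (by omega)
        have e3 := scanRowA_none_of_band x y kw kh (ks + kh + 5 + kh + 5 + kh + 5) (by omega)
        have e4 := scanRowA_none_of_band x y kw kh (ks + kh + 5 + kh + 5 + kh + 5 + kh + 5) (by omega)
        have e5 := scanRowA_none_of_band x y kw kh (ks + kh + 5 + kh + 5 + kh + 5 + kh + 5 + kh + 5) (by omega)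
        have hband : ks < y ∧ y < ks + kh := by constructor <;> omega
        by_cases hkw : kw < 2
        · have e0 : scanRowA x y kw kh (ks) ["1", "2", "3", "4", "5", "6", "7", "8", "9", "0"] 20 = none :=
            scanRowA_plain_none x y kw kh (ks) (by omega) ["1", "2", "3", "4", "5", "6", "7", "8", "9", "0"] 20 (by intro k hk; fin_cases hk <;> simp [widthOf])
          simp only [scanRowsA, e0, e1, e2, e3, e4, e5]
          rw [if_neg (by decide : ¬ (0 : Int) = 5), if_pos hkw]
        · have hkw2 : 2 ≤ kw := by omega
          have e0 := scanRowA_plain x y kw kh (ks) hkw2 hband ["1", "2", "3", "4", "5", "6", "7", "8", "9", "0"] 20 (by intro k hk; fin_cases hk <;> simp [widthOf])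
          simp only [scanRowsA, e0, e1, e2, e3, e4, e5]
          rw [if_neg (by decide : ¬ (0 : Int) = 5), if_neg hkw]
          rw [PySem.Int.floordiv_eq_ediv_of_pos (by omega : (0:Int) < kw + 5),
              PySem.Int.mod_eq_emod_of_pos (by omega : (0:Int) < kw + 5)]
          rw [show PySem.List.pyGetD [["1", "2", "3", "4", "5", "6", "7", "8", "9", "0"], ["Q", "W", "E", "R", "T", "Y", "U", "I", "O", "P"], ["A", "S", "D", "F", "G", "H", "J", "K", "L"], ["Z", "X", "C", "V", "B", "N", "M"], ["." , ",", "?", "!"], ["SPACE", "BACK"]] (0 : Int) [] = ["1", "2", "3", "4", "5", "6", "7", "8", "9", "0"] from by decide]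
          rw [show ks + 0 * (kh + 5) = ks from by ring]
          by_cases hcond : 0 ≤ (x - 20) / (kw + 5) ∧ (x - 20) / (kw + 5) < ((["1", "2", "3", "4", "5", "6", "7", "8", "9", "0"] : List String).length : Int) ∧
              0 < (x - 20) % (kw + 5) ∧ (x - 20) % (kw + 5) < kw
          · rw [if_pos hcond, if_pos hcond]
          · rw [if_neg hcond, if_neg hcond]
      · -- row 1 is the vertical hit
        have e0 := scanRowA_none_of_band x y kw kh (ks) (by omega)
        have e2 := scanRowA_none_of_band x y kw kh (ks + kh + 5 + kh + 5) (by omega)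
        have e3 := scanRowA_none_of_band x y kw kh (ks + kh + 5 + kh + 5 + kh + 5) (by omega)
        have e4 := scanRowA_none_of_band x y kw kh (ks + kh + 5 + kh + 5 + kh + 5 + kh + 5) (by omega)
        have e5 := scanRowA_none_of_band x y kw kh (ks + kh + 5 + kh + 5 + kh + 5 + kh + 5 + kh + 5) (by omega)
        have hband : ks + kh + 5 < y ∧ y < ks + kh + 5 + kh := by constructor <;> omega
        by_cases hkw : kw < 2
        · have e1 : scanRowA x y kw kh (ks + kh + 5) ["Q", "W", "E", "R", "T", "Y", "U", "I", "O", "P"] 20 = none :=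
            scanRowA_plain_none x y kw kh (ks + kh + 5) (by omega) ["Q", "W", "E", "R", "T", "Y", "U", "I", "O", "P"] 20 (by intro k hk; fin_cases hk <;> simp [widthOf])
          simp only [scanRowsA, e0, e1, e2, e3, e4, e5]
          rw [if_neg (by decide : ¬ (1 : Int) = 5), if_pos hkw]
        · have hkw2 : 2 ≤ kw := by omega
          have e1 := scanRowA_plain x y kw kh (ks + kh + 5) hkw2 hband ["Q", "W", "E", "R", "T", "Y", "U", "I", "O", "P"] 20 (by intro k hk; fin_cases hk <;> simp [widthOf])
          simp only [scanRowsA, e0, e1, e2, e3, e4, e5]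
          rw [if_neg (by decide : ¬ (1 : Int) = 5), if_neg hkw]
          rw [PySem.Int.floordiv_eq_ediv_of_pos (by omega : (0:Int) < kw + 5),
              PySem.Int.mod_eq_emod_of_pos (by omega : (0:Int) < kw + 5)]
          rw [show PySem.List.pyGetD [["1", "2", "3", "4", "5", "6", "7", "8", "9", "0"], ["Q", "W", "E", "R", "T", "Y", "U", "I", "O", "P"], ["A", "S", "D", "F", "G", "H", "J", "K", "L"], ["Z", "X", "C", "V", "B", "N", "M"], ["." , ",", "?", "!"], ["SPACE", "BACK"]] (1 : Int) [] = ["Q", "W", "E", "R", "T", "Y", "U", "I", "O", "P"] from by decide]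
          rw [show ks + 1 * (kh + 5) = ks + kh + 5 from by ring]
          by_cases hcond : 0 ≤ (x - 20) / (kw + 5) ∧ (x - 20) / (kw + 5) < ((["Q", "W", "E", "R", "T", "Y", "U", "I", "O", "P"] : List String).length : Int) ∧
              0 < (x - 20) % (kw + 5) ∧ (x - 20) % (kw + 5) < kw
          · rw [if_pos hcond, if_pos hcond]
          · rw [if_neg hcond, if_neg hcond]
      · -- row 2 is the vertical hit
        have e0 := scanRowA_none_of_band x y kw kh (ks) (by omega)
        have e1 := scanRowA_none_of_band x y kw kh (ks + kh + 5) (by omega)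
        have e3 := scanRowA_none_of_band x y kw kh (ks + kh + 5 + kh + 5 + kh + 5) (by omega)
        have e4 := scanRowA_none_of_band x y kw kh (ks + kh + 5 + kh + 5 + kh + 5 + kh + 5) (by omega)
        have e5 := scanRowA_none_of_band x y kw kh (ks + kh + 5 + kh + 5 + kh + 5 + kh + 5 + kh + 5) (by omega)
        have hband : ks + kh + 5 + kh + 5 < y ∧ y < ks + kh + 5 + kh + 5 + kh := by constructor <;> omega
        by_cases hkw : kw < 2
        · have e2 : scanRowA x y kw kh (ks + kh + 5 + kh + 5) ["A", "S", "D", "F", "G", "H", "J", "K", "L"] 20 = none :=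
            scanRowA_plain_none x y kw kh (ks + kh + 5 + kh + 5) (by omega) ["A", "S", "D", "F", "G", "H", "J", "K", "L"] 20 (by intro k hk; fin_cases hk <;> simp [widthOf])
          simp only [scanRowsA, e0, e1, e2, e3, e4, e5]
          rw [if_neg (by decide : ¬ (2 : Int) = 5), if_pos hkw]
        · have hkw2 : 2 ≤ kw := by omega
          have e2 := scanRowA_plain x y kw kh (ks + kh + 5 + kh + 5) hkw2 hband ["A", "S", "D", "F", "G", "H", "J", "K", "L"] 20 (by intro k hk; fin_cases hk <;> simp [widthOf])
          simp only [scanRowsA, e0, e1, e2, e3, e4, e5]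
          rw [if_neg (by decide : ¬ (2 : Int) = 5), if_neg hkw]
          rw [PySem.Int.floordiv_eq_ediv_of_pos (by omega : (0:Int) < kw + 5),
              PySem.Int.mod_eq_emod_of_pos (by omega : (0:Int) < kw + 5)]
          rw [show PySem.List.pyGetD [["1", "2", "3", "4", "5", "6", "7", "8", "9", "0"], ["Q", "W", "E", "R", "T", "Y", "U", "I", "O", "P"], ["A", "S", "D", "F", "G", "H", "J", "K", "L"], ["Z", "X", "C", "V", "B", "N", "M"], ["." , ",", "?", "!"], ["SPACE", "BACK"]] (2 : Int) [] = ["A", "S", "D", "F", "G", "H", "J", "K", "L"] from by decide]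
          rw [show ks + 2 * (kh + 5) = ks + kh + 5 + kh + 5 from by ring]
          by_cases hcond : 0 ≤ (x - 20) / (kw + 5) ∧ (x - 20) / (kw + 5) < ((["A", "S", "D", "F", "G", "H", "J", "K", "L"] : List String).length : Int) ∧
              0 < (x - 20) % (kw + 5) ∧ (x - 20) % (kw + 5) < kw
          · rw [if_pos hcond, if_pos hcond]
          · rw [if_neg hcond, if_neg hcond]
      · -- row 3 is the vertical hit
        have e0 := scanRowA_none_of_band x y kw kh (ks) (by omega)
        have e1 := scanRowA_none_of_band x y kw kh (ks + kh + 5) (by omega)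
        have e2 := scanRowA_none_of_band x y kw kh (ks + kh + 5 + kh + 5) (by omega)
        have e4 := scanRowA_none_of_band x y kw kh (ks + kh + 5 + kh + 5 + kh + 5 + kh + 5) (by omega)
        have e5 := scanRowA_none_of_band x y kw kh (ks + kh + 5 + kh + 5 + kh + 5 + kh + 5 + kh + 5) (by omega)
        have hband : ks + kh + 5 + kh + 5 + kh + 5 < y ∧ y < ks + kh + 5 + kh + 5 + kh + 5 + kh := by constructor <;> omega
        by_cases hkw : kw < 2
        · have e3 : scanRowA x y kw kh (ks + kh + 5 + kh + 5 + kh + 5) ["Z", "X", "C", "V", "B", "N", "M"] 20 = none :=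
            scanRowA_plain_none x y kw kh (ks + kh + 5 + kh + 5 + kh + 5) (by omega) ["Z", "X", "C", "V", "B", "N", "M"] 20 (by intro k hk; fin_cases hk <;> simp [widthOf])
          simp only [scanRowsA, e0, e1, e2, e3, e4, e5]
          rw [if_neg (by decide : ¬ (3 : Int) = 5), if_pos hkw]
        · have hkw2 : 2 ≤ kw := by omega
          have e3 := scanRowA_plain x y kw kh (ks + kh + 5 + kh + 5 + kh + 5) hkw2 hband ["Z", "X", "C", "V", "B", "N", "M"] 20 (by intro k hk; fin_cases hk <;> simp [widthOf])
          simp only [scanRowsA, e0, e1, e2, e3, e4, e5]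
          rw [if_neg (by decide : ¬ (3 : Int) = 5), if_neg hkw]
          rw [PySem.Int.floordiv_eq_ediv_of_pos (by omega : (0:Int) < kw + 5),
              PySem.Int.mod_eq_emod_of_pos (by omega : (0:Int) < kw + 5)]
          rw [show PySem.List.pyGetD [["1", "2", "3", "4", "5", "6", "7", "8", "9", "0"], ["Q", "W", "E", "R", "T", "Y", "U", "I", "O", "P"], ["A", "S", "D", "F", "G", "H", "J", "K", "L"], ["Z", "X", "C", "V", "B", "N", "M"], ["." , ",", "?", "!"], ["SPACE", "BACK"]] (3 : Int) [] = ["Z", "X", "C", "V", "B", "N", "M"] from by decide]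
          rw [show ks + 3 * (kh + 5) = ks + kh + 5 + kh + 5 + kh + 5 from by ring]
          by_cases hcond : 0 ≤ (x - 20) / (kw + 5) ∧ (x - 20) / (kw + 5) < ((["Z", "X", "C", "V", "B", "N", "M"] : List String).length : Int) ∧
              0 < (x - 20) % (kw + 5) ∧ (x - 20) % (kw + 5) < kw
          · rw [if_pos hcond, if_pos hcond]
          · rw [if_neg hcond, if_neg hcond]
      · -- row 4 is the vertical hit
        have e0 := scanRowA_none_of_band x y kw kh (ks) (by omega)
        have e1 := scanRowA_none_of_band x y kw kh (ks + kh + 5) (by omega)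
        have e2 := scanRowA_none_of_band x y kw kh (ks + kh + 5 + kh + 5) (by omega)
        have e3 := scanRowA_none_of_band x y kw kh (ks + kh + 5 + kh + 5 + kh + 5) (by omega)
        have e5 := scanRowA_none_of_band x y kw kh (ks + kh + 5 + kh + 5 + kh + 5 + kh + 5 + kh + 5) (by omega)
        have hband : ks + kh + 5 + kh + 5 + kh + 5 + kh + 5 < y ∧ y < ks + kh + 5 + kh + 5 + kh + 5 + kh + 5 + kh := by constructor <;> omega
        by_cases hkw : kw < 2
        · have e4 : scanRowA x y kw kh (ks + kh + 5 + kh + 5 + kh + 5 + kh + 5) ["." , ",", "?", "!"] 20 = none :=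
            scanRowA_plain_none x y kw kh (ks + kh + 5 + kh + 5 + kh + 5 + kh + 5) (by omega) ["." , ",", "?", "!"] 20 (by intro k hk; fin_cases hk <;> simp [widthOf])
          simp only [scanRowsA, e0, e1, e2, e3, e4, e5]
          rw [if_neg (by decide : ¬ (4 : Int) = 5), if_pos hkw]
        · have hkw2 : 2 ≤ kw := by omega
          have e4 := scanRowA_plain x y kw kh (ks + kh + 5 + kh + 5 + kh + 5 + kh + 5) hkw2 hband ["." , ",", "?", "!"] 20 (by intro k hk; fin_cases hk <;> simp [widthOf])
          simp only [scanRowsA, e0, e1, e2, e3, e4, e5]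
          rw [if_neg (by decide : ¬ (4 : Int) = 5), if_neg hkw]
          rw [PySem.Int.floordiv_eq_ediv_of_pos (by omega : (0:Int) < kw + 5),
              PySem.Int.mod_eq_emod_of_pos (by omega : (0:Int) < kw + 5)]
          rw [show PySem.List.pyGetD [["1", "2", "3", "4", "5", "6", "7", "8", "9", "0"], ["Q", "W", "E", "R", "T", "Y", "U", "I", "O", "P"], ["A", "S", "D", "F", "G", "H", "J", "K", "L"], ["Z", "X", "C", "V", "B", "N", "M"], ["." , ",", "?", "!"], ["SPACE", "BACK"]] (4 : Int) [] = ["." , ",", "?", "!"] from by decide]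
          rw [show ks + 4 * (kh + 5) = ks + kh + 5 + kh + 5 + kh + 5 + kh + 5 from by ring]
          by_cases hcond : 0 ≤ (x - 20) / (kw + 5) ∧ (x - 20) / (kw + 5) < ((["." , ",", "?", "!"] : List String).length : Int) ∧
              0 < (x - 20) % (kw + 5) ∧ (x - 20) % (kw + 5) < kw
          · rw [if_pos hcond, if_pos hcond]
          · rw [if_neg hcond, if_neg hcond]
      · -- row 5 ("SPACE"/"BACK") is the vertical hit
        have e0 := scanRowA_none_of_band x y kw kh (ks) (by omega)
        have e1 := scanRowA_none_of_band x y kw kh (ks + kh + 5) (by omega)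
        have e2 := scanRowA_none_of_band x y kw kh (ks + kh + 5 + kh + 5) (by omega)
        have e3 := scanRowA_none_of_band x y kw kh (ks + kh + 5 + kh + 5 + kh + 5) (by omega)
        have e4 := scanRowA_none_of_band x y kw kh (ks + kh + 5 + kh + 5 + kh + 5 + kh + 5) (by omega)
        have hband : ks + kh + 5 + kh + 5 + kh + 5 + kh + 5 + kh + 5 < y ∧ y < ks + kh + 5 + kh + 5 + kh + 5 + kh + 5 + kh + 5 + kh := by constructor <;> omega
        simp only [scanRowsA, e0, e1, e2, e3, e4]
        simp only [scanRowA, widthOf, String.reduceEq, if_true, if_false]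
        by_cases hx1 : 20 < x ∧ x < 20 + kw * 4
        · rw [if_pos ⟨hx1.1, hx1.2, hband.1, hband.2⟩, if_pos hx1]
          rw [show ks + 5 * (kh + 5) = ks + kh + 5 + kh + 5 + kh + 5 + kh + 5 + kh + 5 from by ring]
        · rw [if_neg (fun hc => hx1 ⟨hc.1, hc.2.1⟩), if_neg hx1]
          by_cases hx2 : 25 + kw * 4 < x ∧ x < 25 + kw * 4 + kw * 2
          · rw [if_pos (⟨by omega, by omega, hband.1, hband.2⟩ :
              20 + kw * 4 + 5 < x ∧ x < 20 + kw * 4 + 5 + kw * 2 ∧ ks + kh + 5 + kh + 5 + kh + 5 + kh + 5 + kh + 5 < y ∧ y < ks + kh + 5 + kh + 5 + kh + 5 + kh + 5 + kh + 5 + kh),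
              if_pos hx2]
            rw [show (25 : Int) + kw * 4 = 20 + kw * 4 + 5 from by ring,
                show ks + 5 * (kh + 5) = ks + kh + 5 + kh + 5 + kh + 5 + kh + 5 + kh + 5 from by ring]
          · rw [if_neg (fun hc => hx2 ⟨by omega, by omega⟩), if_neg hx2]
    · -- no row band holds: A scans every row without a vertical hit
      have hband : ∀ i : Int, 0 ≤ i → i < 6 →
          ¬ (ks + i * (kh + 5) < y ∧ y < ks + i * (kh + 5) + kh) := by
        rintro i hi0 hi6 ⟨h1, h2⟩
        have hqi : q = i := band_forces_q hp hr0 hrlt (by linarith) (by linarith)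
        rw [hqi] at hdc hqr
        exact hqr ⟨hi0, hi6, by linarith, by linarith⟩
      have e0 := scanRowA_none_of_band x y kw kh (ks)
        (fun hb => hband 0 (by norm_num) (by norm_num) ⟨by linarith [hb.1], by linarith [hb.2]⟩)
      have e1 := scanRowA_none_of_band x y kw kh (ks + kh + 5)
        (fun hb => hband 1 (by norm_num) (by norm_num) ⟨by linarith [hb.1], by linarith [hb.2]⟩)
      have e2 := scanRowA_none_of_band x y kw kh (ks + kh + 5 + kh + 5)
        (fun hb => hband 2 (by norm_num) (by norm_num) ⟨by linarith [hb.1], by linarith [hb.2]⟩)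
      have e3 := scanRowA_none_of_band x y kw kh (ks + kh + 5 + kh + 5 + kh + 5)
        (fun hb => hband 3 (by norm_num) (by norm_num) ⟨by linarith [hb.1], by linarith [hb.2]⟩)
      have e4 := scanRowA_none_of_band x y kw kh (ks + kh + 5 + kh + 5 + kh + 5 + kh + 5)
        (fun hb => hband 4 (by norm_num) (by norm_num) ⟨by linarith [hb.1], by linarith [hb.2]⟩)
      have e5 := scanRowA_none_of_band x y kw kh (ks + kh + 5 + kh + 5 + kh + 5 + kh + 5 + kh + 5)
        (fun hb => hband 5 (by norm_num) (by norm_num) ⟨by linarith [hb.1], by linarith [hb.2]⟩)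
      simp only [scanRowsA, e0, e1, e2, e3, e4, e5]
      rw [if_pos hqr]

-- ===== VERDICT (by name: the statement is the Claim_ definition above) =====
theorem get_key_at_position_spec : Claim_equal_get_key_at_position := by
  intro x y kw kh ks _
  unfold Spec_get_key_at_position
  exact main_equiv x y kw kh ks
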